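-- pv_equiv track=rewrite | github.com/frnmst/python-training | www.practicepython.org/23.py | get_duplicates
-- ===== SOURCE A (Python) =====
-- def get_duplicates(ordered_list):
--     duplicates = []
--     # Invariants should be ok.
--     i = 1
--     while i < len(ordered_list) and len(ordered_list) > 1:
--         if ordered_list[i-1] == ordered_list[i]:
--             duplicates.append(ordered_list[i])
--         i += 1
--
--     return duplicates
-- ===== SOURCE B (Python) =====
-- from itertools import groupby
--
-- def get_duplicates(ordered_list):
--     duplicates = []
--     for value, group in groupby(ordered_list):
--         c = sum(1 for _ in group)
--         duplicates.extend([value] * (c - 1))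
--     return duplicates
-- ===== Notes on version B (the rewrite author's own statement) =====
-- stated objective: idiomatic
-- what changed: B replaces the index-based adjacent-pair while loop with itertools.groupby: it partitions the list into maximal runs of equal elements and emits each run's value (run length - 1) times.
import Mathlib
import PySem

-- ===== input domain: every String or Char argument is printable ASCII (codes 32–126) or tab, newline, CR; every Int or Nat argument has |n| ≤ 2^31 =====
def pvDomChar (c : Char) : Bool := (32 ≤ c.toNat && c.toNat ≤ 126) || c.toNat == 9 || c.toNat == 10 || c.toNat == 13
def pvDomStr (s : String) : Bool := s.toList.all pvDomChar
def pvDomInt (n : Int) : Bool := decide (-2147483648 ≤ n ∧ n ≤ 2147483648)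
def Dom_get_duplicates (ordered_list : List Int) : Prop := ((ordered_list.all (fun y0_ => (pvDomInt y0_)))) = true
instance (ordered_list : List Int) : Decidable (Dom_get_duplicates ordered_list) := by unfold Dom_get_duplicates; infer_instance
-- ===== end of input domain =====

-- B replaces A's index-based adjacent-pair while loop by a run-grouping pass (itertools.groupby):
-- each maximal run of equal elements of length c contributes its value c-1 times (idiomatic; same output).


-- ===== PORT A =====
-- while i < len(...) and len(...) > 1: the second conjunct is implied by the first once i ≥ 1,
-- so the loop runs exactly over i = 1 .. len-1 (range(1, len)).
def get_duplicates (ordered_list : List Int) : List Int :=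
  (PySem.List.pyRange 1 (ordered_list.length : Int) 1).foldl
    (fun duplicates i =>
      if PySem.List.pyGetD ordered_list (i - 1) 0 = PySem.List.pyGetD ordered_list i 0
      then duplicates ++ [PySem.List.pyGetD ordered_list i 0]
      else duplicates) []

-- ===== PORT B =====
-- pvTakeRun x xs = (number of leading copies of x in xs, the remainder after them)
def pvTakeRun (x : Int) : List Int → Nat × List Int
  | [] => (0, [])
  | y :: ys => if y = x then ((pvTakeRun x ys).1 + 1, (pvTakeRun x ys).2) else (0, y :: ys)

theorem pvTakeRun_len (x : Int) : ∀ xs : List Int, (pvTakeRun x xs).2.length ≤ xs.length := by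
  intro xs
  induction xs with
  | nil => simp [pvTakeRun]
  | cons y ys ih =>
    simp only [pvTakeRun]
    split_ifs
    · simp only [List.length_cons]; omega
    · simp

-- the list of maximal runs (value, run length), as itertools.groupby produces them
def pvRuns : List Int → List (Int × Nat)
  | [] => []
  | x :: xs =>
    (x, (pvTakeRun x xs).1 + 1) :: pvRuns (pvTakeRun x xs).2
termination_by l => l.length
decreasing_by simpa using Nat.lt_succ_of_le (pvTakeRun_len x xs)

def get_duplicates_alt (ordered_list : List Int) : List Int :=
  (pvRuns ordered_list).foldl
    (fun duplicates vc => duplicates ++ List.replicate (vc.2 - 1) vc.1) []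

-- ===== PRECONDITION & SPEC =====
def Spec_get_duplicates (ordered_list : List Int) (out : List Int) : Prop := out = get_duplicates_alt ordered_list
instance (ordered_list : List Int) (out : List Int) : Decidable (Spec_get_duplicates ordered_list out) := by unfold Spec_get_duplicates; infer_instance

-- ===== CLAIM (what is proved, stated in full; the proofs are below) =====
def Claim_equal_get_duplicates : Prop := ∀ (ordered_list : List Int), Dom_get_duplicates ordered_list → Spec_get_duplicates ordered_list (get_duplicates ordered_list)

-- ===== LEMMAS AND PROOFS =====

-- the common characterisation: the elements of each adjacent equal pair, second component
def pvPd : List Int → List Int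
  | a :: b :: t => (if a = b then [b] else []) ++ pvPd (b :: t)
  | _ => []

theorem pvAloop : ∀ (l : List Int) (acc : List Int),
    (List.range (l.length - 1)).foldl
      (fun acc k => if l.getD k 0 = l.getD (k + 1) 0 then acc ++ [l.getD (k + 1) 0] else acc) acc
      = acc ++ pvPd l := by
  intro l
  induction l with
  | nil => intro acc; simp [pvPd]
  | cons a xs ih =>
    intro acc
    match xs, ih with
    | [], _ => simp [pvPd]
    | b :: t, ih =>
      have hlen : (a :: b :: t).length - 1 = (b :: t).length - 1 + 1 := by simp
      rw [hlen, List.range_succ_eq_map, List.foldl_cons, List.foldl_map]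
      simp only [List.getD_cons_zero, List.getD_cons_succ, Nat.succ_eq_add_one]
      have ih' := ih (if a = b then acc ++ [b] else acc)
      simp only [List.getD_cons_succ] at ih'
      rw [ih']
      show _ = acc ++ pvPd (a :: b :: t)
      rw [pvPd]
      split_ifs <;> simp

theorem pvPd_run : ∀ (c : Nat) (x : Int) (rest : List Int), rest.head? ≠ some x →
    pvPd (x :: (List.replicate c x ++ rest)) = List.replicate c x ++ pvPd rest := by
  intro c
  induction c with
  | zero =>
    intro x rest h
    match rest with
    | [] => simp [pvPd]
    | y :: t =>
      have : x ≠ y := by intro e; exact h (by simp [e])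
      simp [pvPd, this]
  | succ c ih =>
    intro x rest h
    have := ih x rest h
    simp only [List.replicate_succ, List.cons_append]
    rw [pvPd]
    rw [this]
    simp

theorem pvTakeRun_decomp (x : Int) : ∀ xs : List Int,
    xs = List.replicate (pvTakeRun x xs).1 x ++ (pvTakeRun x xs).2 ∧
    (pvTakeRun x xs).2.head? ≠ some x := by
  intro xs
  induction xs with
  | nil => simp [pvTakeRun]
  | cons y ys ih =>
    by_cases h : y = x
    · simp only [pvTakeRun, if_pos h]
      refine ⟨?_, ih.2⟩
      conv_lhs => rw [h, ih.1]
      simp [List.replicate_succ]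
    · simp only [pvTakeRun, if_neg h]
      exact ⟨by simp, by simp [h]⟩

theorem pvBloop : ∀ (l : List Int) (acc : List Int),
    (pvRuns l).foldl (fun duplicates vc => duplicates ++ List.replicate (vc.2 - 1) vc.1) acc
      = acc ++ pvPd l := by
  intro l
  induction l using pvRuns.induct with
  | case1 => intro acc; simp [pvRuns, pvPd]
  | case2 x xs ih =>
    intro acc
    rw [pvRuns]
    simp only [List.foldl_cons, Nat.add_sub_cancel]
    rw [ih]
    obtain ⟨hdec, hhead⟩ := pvTakeRun_decomp x xs
    conv_rhs => rw [hdec]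
    rw [pvPd_run _ x _ hhead]
    simp

-- ===== VERDICT (by name: the statement is the Claim_ definition above) =====
theorem get_duplicates_spec : Claim_equal_get_duplicates := by
  intro l _
  show get_duplicates l = get_duplicates_alt l
  unfold get_duplicates get_duplicates_alt
  rw [PySem.List.pyRange_one, List.foldl_map, pvBloop]
  have hcast : ∀ k : Nat, (1 + (k : Int)) - 1 = ((k : Int)) := by intro k; ring
  have hget : ∀ k : Nat, PySem.List.pyGetD l (k : Int) 0 = l.getD k 0 := by
    intro k; exact PySem.List.pyGetD_natCast l k 0
  have hbody : (fun (acc : List Int) (k : Nat) =>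
      if PySem.List.pyGetD l ((1 + (k : Int)) - 1) 0 = PySem.List.pyGetD l (1 + (k : Int)) 0
      then acc ++ [PySem.List.pyGetD l (1 + (k : Int)) 0] else acc)
      = (fun acc k => if l.getD k 0 = l.getD (k + 1) 0 then acc ++ [l.getD (k + 1) 0] else acc) := by
    funext acc k
    have h1 : (1 + (k : Int)) - 1 = ((k : Int)) := by ring
    have h2 : (1 + (k : Int)) = ((k + 1 : Nat) : Int) := by push_cast; ring
    rw [h1, h2, hget, hget]
  rw [hbody]
  have hn : ((l.length : Int) - 1).toNat = l.length - 1 := by omega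
  rw [hn, pvAloop]
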